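-- pv_equiv track=rewrite | github.com/pypi-data/pypi-mirror-398 | packages/slrquerytester/slrquerytester-0.2.1-py3-none-any.whl/slrquerytester/connectors/base_connector.py | _from_first_von_last
-- ===== SOURCE A (Python) =====
-- def _from_first_von_last(name: str) -> str:
--     """
--     Handles a name with no commas, presumably "First von Last".
--     However, we attempt to detect whether there is a 'von' part inside
--     by analyzing the tokens from right to left.
--
--     Minimal approach:
--     1) Split on whitespace
--     2) The rightmost token(s) are the last name
--     3) Any continuous run of lowercased tokens (like 'de', 'van', etc.)
--        to the LEFT of the last name get treated as 'von' part
--     4) Everything else at the front is the first name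
--     """
--     tokens = name.split()
--     if not tokens:
--         # Empty or bizarre input
--         return name
--
--     # We'll parse from the right to left to find where 'Last' begins.
--     # Typically, 'Last' (surname) is the final token or tokens that are
--     # capitalized or mixed. The 'von' part is typically purely lowercase.
--
--     # Reverse tokens to iterate from last to first
--     reversed_tokens = list(reversed(tokens))
--
--     # Identify 'last' portion
--     # We collect from the end to the first encountered lowercased token
--     # that we interpret as 'von'. This is a naive approach, but fairly standard
--     # for BibTeX parsing.
--
--     last_parts = []
--     von_parts = []
--     first_parts = []
--
--     # Start reading from the end:
--     # - If the token is all-lowercase, we might call it von-part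
--     # - If the token has uppercase, we consider it part of the last name
--     # We keep going until we see a purely-lowercase token to the left
--     # of an uppercase token. Then everything else is 'first part'.
--
--     # Example: "Jean de la Fontaine"
--     # reversed => ["Fontaine", "la", "de", "Jean"]
--     # => last = ["Fontaine"]
--     # => von = ["la", "de"]
--     # => first = ["Jean"]
--
--     # We basically gather the last name until we find a fully-lower token that
--     # appears to be 'von', but if we find multiple uppercase tokens, we consider them
--     # all as part of the last name.
--     # Then the remainder is 'first'.
--
--     state = 'collect_last'
--     for token in reversed_tokens:
--         # Once we've assigned 'collect_von', if we see an uppercase token,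
--         # we revert to collecting in 'first'.
--         if state == 'collect_last':
--             if token.islower():
--                 # This might be part of the von section,
--                 # so move to collect_von
--                 state = 'collect_von'
--                 von_parts.append(token)
--             else:
--                 last_parts.append(token)
--         elif state == 'collect_von':
--             if token.islower():
--                 von_parts.append(token)
--             else:
--                 # Now we consider anything left as part of 'first'
--                 state = 'collect_first'
--                 first_parts.append(token)
--         else:
--             # state == 'collect_first'
--             first_parts.append(token)
--
--     # Now we have reversed lists
--     # Re-reverse them to get the correct order
--     last_parts.reverse()
--     von_parts.reverse()
--     first_parts.reverse()
--
--     # Join them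
--     # "First" is everything in first_parts
--     # "von" is everything in von_parts
--     # "Last" is everything in last_parts
--     # e.g. "Jean" + "de la" + "Fontaine" => "Jean de la Fontaine"
--
--     first_str = " ".join(first_parts)
--     von_str = " ".join(von_parts)
--     last_str = " ".join(last_parts)
--
--     # Build final name
--     if von_str and last_str:
--         return f"{first_str} {von_str} {last_str}".strip()
--     elif last_str:
--         return f"{first_str} {last_str}".strip()
--     else:
--         # If for some reason there's no last_str, just return name as-is
--         return name
-- ===== SOURCE B (Python) =====
-- def _from_first_von_last(name: str) -> str:
--     tokens = name.split()
--     if not tokens or tokens[-1].islower():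
--         return name
--     return " ".join(tokens)
-- ===== Notes on version B (the rewrite author's own statement) =====
-- stated objective: simpler
-- what changed: Replaces the reversed three-state parse (last/von/first buffers, re-reversal, conditional re-join) with the closed-form observation that A always returns the single-space re-join of the tokens, except when there are no tokens or the rightmost token is islower(), where it returns the input unchanged.
import Mathlib
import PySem

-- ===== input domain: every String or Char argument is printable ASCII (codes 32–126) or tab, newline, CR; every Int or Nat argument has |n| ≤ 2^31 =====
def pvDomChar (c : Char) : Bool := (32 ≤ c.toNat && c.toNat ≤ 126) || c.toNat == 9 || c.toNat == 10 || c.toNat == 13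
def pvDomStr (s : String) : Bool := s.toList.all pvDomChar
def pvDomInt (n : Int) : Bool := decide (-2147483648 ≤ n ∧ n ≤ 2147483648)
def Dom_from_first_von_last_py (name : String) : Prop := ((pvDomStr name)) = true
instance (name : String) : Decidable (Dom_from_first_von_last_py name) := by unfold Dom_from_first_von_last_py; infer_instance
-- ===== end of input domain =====

-- B replaces A's reversed three-state parse by the closed-form observation that A returns
-- the single-space re-join of the tokens unless there are no tokens or the rightmost token
-- is islower(), where it returns the input unchanged (objective: simpler).

-- shared hand port of Python str.islower(): at least one cased character and no uppercase
-- character; exact on the ASCII domain, where the cased characters are exactly a-z and A-Z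
def pyStrIslower (cs : List Char) : Bool :=
  cs.any PySem.Chars.islower && cs.all (fun c => !PySem.Chars.isupper c)

def fvlLoop : List (List Char) → Nat → List (List Char) → List (List Char) →
    List (List Char) → List (List Char) × List (List Char) × List (List Char)
  | [], _, l, v, f => (l, v, f)
  | t :: rest, st, l, v, f =>
    if st = 0 then
      if pyStrIslower t then fvlLoop rest 1 l (v ++ [t]) f
      else fvlLoop rest 0 (l ++ [t]) v f
    else if st = 1 then
      if pyStrIslower t then fvlLoop rest 1 l (v ++ [t]) f
      else fvlLoop rest 2 l v (f ++ [t])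
    else fvlLoop rest 2 l v (f ++ [t])

-- ===== PORT A =====
-- the state machine over the reversed tokens: state 0 = collect_last, 1 = collect_von,
-- 2 = collect_first; returns (last_parts, von_parts, first_parts) still in reversed order
def from_first_von_last_py (name : String) : String :=
  let tokens := PySem.Chars.split₀ name.toList
  if tokens = [] then name
  else
    let reversed_tokens := tokens.reverse
    let res := fvlLoop reversed_tokens 0 [] [] []
    let last_parts := res.1.reverse
    let von_parts := res.2.1.reverse
    let first_parts := res.2.2.reverse
    let first_str := PySem.Chars.join [' '] first_parts
    let von_str := PySem.Chars.join [' '] von_parts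
    let last_str := PySem.Chars.join [' '] last_parts
    if von_str ≠ [] ∧ last_str ≠ [] then
      String.ofList (PySem.Chars.strip (first_str ++ [' '] ++ von_str ++ [' '] ++ last_str))
    else if last_str ≠ [] then
      String.ofList (PySem.Chars.strip (first_str ++ [' '] ++ last_str))
    else name

-- ===== PORT B =====
def from_first_von_last_py_alt (name : String) : String :=
  let tokens := PySem.Chars.split₀ name.toList
  match tokens.getLast? with
  | none => name
  | some t =>
    if pyStrIslower t then name
    else String.ofList (PySem.Chars.join [' '] tokens)


-- ===== PRECONDITION & SPEC =====
def Spec_from_first_von_last_py (name : String) (out : String) : Prop := out = from_first_von_last_py_alt name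
instance (name : String) (out : String) : Decidable (Spec_from_first_von_last_py name out) := by unfold Spec_from_first_von_last_py; infer_instance

-- ===== CLAIM (what is proved, stated in full; the proofs are below) =====
def Claim_equal_from_first_von_last_py : Prop := ∀ (name : String), Dom_from_first_von_last_py name → Spec_from_first_von_last_py name (from_first_von_last_py name)

-- ===== LEMMAS AND PROOFS =====
theorem split₀_go_tokens : ∀ (s cur : List Char) (acc : List (List Char)),
    (∀ t ∈ acc, t ≠ [] ∧ ∀ c ∈ t, PySem.Chars.isspace c = false) →
    (∀ c ∈ cur, PySem.Chars.isspace c = false) →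
    ∀ t ∈ PySem.Chars.split₀.go s cur acc, t ≠ [] ∧ ∀ c ∈ t, PySem.Chars.isspace c = false := by
  intro s
  induction s with
  | nil =>
    intro cur acc hacc hcur t ht
    by_cases h : cur.isEmpty
    · simp [PySem.Chars.split₀.go, h] at ht
      exact hacc t ht
    · simp [PySem.Chars.split₀.go, h] at ht
      rcases ht with ht | ht
      · exact hacc t ht
      · subst ht
        refine ⟨by simpa [List.isEmpty_iff] using h, ?_⟩
        intro c hc; exact hcur c (by simpa using hc)
  | cons c rest ih =>
    intro cur acc hacc hcur t ht
    by_cases hs : PySem.Chars.isspace c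
    · by_cases h : cur.isEmpty
      · rw [PySem.Chars.split₀.go] at ht
        simp only [hs, h, if_true] at ht
        exact ih [] acc hacc (by simp) t ht
      · rw [PySem.Chars.split₀.go] at ht
        simp only [hs, h, if_true, if_false, Bool.false_eq_true] at ht
        refine ih [] (cur.reverse :: acc) ?_ (by simp) t ht
        intro u hu
        rcases List.mem_cons.mp hu with rfl | hu
        · refine ⟨by simpa [List.isEmpty_iff] using h, ?_⟩
          intro d hd; exact hcur d (by simpa using hd)
        · exact hacc u hu
    · rw [PySem.Chars.split₀.go] at ht
      simp only [hs, Bool.false_eq_true, if_false] at ht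
      refine ih (c :: cur) acc hacc ?_ t ht
      intro d hd
      rcases List.mem_cons.mp hd with rfl | hd
      · exact eq_false_of_ne_true hs
      · exact hcur d hd

theorem split₀_tokens (cs : List Char) :
    ∀ t ∈ PySem.Chars.split₀ cs, t ≠ [] ∧ ∀ c ∈ t, PySem.Chars.isspace c = false := by
  exact split₀_go_tokens cs [] [] (by simp) (by simp)

theorem fvlLoop_state2 : ∀ (r l v f : List (List Char)),
    fvlLoop r 2 l v f = (l, v, f ++ r) := by
  intro r
  induction r with
  | nil => simp [fvlLoop]
  | cons t rest ih => intro l v f; simp [fvlLoop, ih]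

theorem fvlLoop_state1 : ∀ (r l v f : List (List Char)),
    fvlLoop r 1 l v f =
      (l, v ++ r.takeWhile pyStrIslower, f ++ r.dropWhile pyStrIslower) := by
  intro r
  induction r with
  | nil => simp [fvlLoop]
  | cons t rest ih =>
    intro l v f
    by_cases h : pyStrIslower t
    · simp [fvlLoop, h, ih]
    · simp [fvlLoop, h, fvlLoop_state2]

theorem fvlLoop_state0 : ∀ (r l v f : List (List Char)),
    fvlLoop r 0 l v f =
      (l ++ r.takeWhile (fun t => !pyStrIslower t),
       v ++ (r.dropWhile (fun t => !pyStrIslower t)).takeWhile pyStrIslower,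
       f ++ (r.dropWhile (fun t => !pyStrIslower t)).dropWhile pyStrIslower) := by
  intro r
  induction r with
  | nil => simp [fvlLoop]
  | cons t rest ih =>
    intro l v f
    by_cases h : pyStrIslower t
    · simp [fvlLoop, h, fvlLoop_state1]
    · simp [fvlLoop, h, ih]


theorem join_append (sep : List Char) (xs ys : List (List Char)) (hx : xs ≠ []) (hy : ys ≠ []) :
    PySem.Chars.join sep (xs ++ ys) = PySem.Chars.join sep xs ++ sep ++ PySem.Chars.join sep ys := by
  induction xs with
  | nil => simp at hx
  | cons x xs ih =>
    cases xs with
    | nil =>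
      cases ys with
      | nil => simp at hy
      | cons y ys => simp [PySem.Chars.join_cons_cons, PySem.Chars.join_singleton]
    | cons x' xs' =>
      rw [show ((x :: x' :: xs') ++ ys) = x :: x' :: (xs' ++ ys) from rfl,
        PySem.Chars.join_cons_cons, ← List.cons_append, ih (by simp),
        PySem.Chars.join_cons_cons]
      simp

theorem join_head_append (sep : List Char) (x : List Char) (xs : List (List Char)) :
    ∃ tl, PySem.Chars.join sep (x :: xs) = x ++ tl := by
  cases xs with
  | nil => exact ⟨[], by simp [PySem.Chars.join_singleton]⟩
  | cons y ys => exact ⟨sep ++ PySem.Chars.join sep (y :: ys), by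
      rw [PySem.Chars.join_cons_cons]; simp⟩

theorem join_ne_nil (sep : List Char) (x : List Char) (xs : List (List Char)) (hx : x ≠ []) :
    PySem.Chars.join sep (x :: xs) ≠ [] := by
  obtain ⟨tl, htl⟩ := join_head_append sep x xs
  rw [htl]
  simp [hx]

theorem strip_id_of (cs : List Char)
    (h1 : ∃ c cs', cs = c :: cs' ∧ PySem.Chars.isspace c = false)
    (h2 : ∃ d pre, cs = pre ++ [d] ∧ PySem.Chars.isspace d = false) :
    PySem.Chars.strip cs = cs := by
  obtain ⟨c, cs', rfl, hc⟩ := h1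
  obtain ⟨d, pre, heq, hd⟩ := h2
  have hl : PySem.Chars.lstrip (c :: cs') = c :: cs' := by
    simp [PySem.Chars.lstrip, hc]
  rw [PySem.Chars.strip, hl, heq, PySem.Chars.rstrip]
  simp [hd]

theorem strip_join (ts : List (List Char)) (hne : ts ≠ [])
    (htok : ∀ t ∈ ts, t ≠ [] ∧ ∀ c ∈ t, PySem.Chars.isspace c = false) :
    PySem.Chars.strip (PySem.Chars.join [' '] ts) = PySem.Chars.join [' '] ts := by
  obtain ⟨x, xs, rfl⟩ := List.exists_cons_of_ne_nil hne
  apply strip_id_of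
  · obtain ⟨c, x', hx⟩ := List.exists_cons_of_ne_nil (htok x (by simp)).1
    obtain ⟨tl, htl⟩ := join_head_append [' '] x xs
    refine ⟨c, x' ++ tl, ?_, (htok x (by simp)).2 c (by rw [hx]; simp)⟩
    rw [htl, hx]; simp
  · set y := (x :: xs).getLast (by simp) with hy
    have hsplit : x :: xs = (x :: xs).dropLast ++ [y] := (List.dropLast_append_getLast (by simp)).symm
    have hymem : y ∈ x :: xs := List.getLast_mem _
    obtain ⟨d, y', hyeq⟩ : ∃ d y', y = y' ++ [d] := by
      obtain ⟨c, t, hct⟩ := List.exists_cons_of_ne_nil ((htok y hymem).1)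
      refine ⟨(c :: t).getLast (by simp), (c :: t).dropLast, ?_⟩
      rw [hct]
      exact (List.dropLast_append_getLast (by simp)).symm
    have hd : PySem.Chars.isspace d = false := (htok y hymem).2 d (by rw [hyeq]; simp)
    by_cases hdl : (x :: xs).dropLast = []
    · refine ⟨d, y', ?_, hd⟩
      conv_lhs => rw [hsplit, hdl]
      rw [List.nil_append, PySem.Chars.join_singleton, hyeq]
    · refine ⟨d, PySem.Chars.join [' '] ((x :: xs).dropLast) ++ [' '] ++ y', ?_, hd⟩
      conv_lhs => rw [hsplit]
      rw [join_append [' '] _ [y] hdl (by simp), PySem.Chars.join_singleton, hyeq]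
      simp

theorem dropWhile_head_false {α : Type} (p : α → Bool) :
    ∀ (l : List α) (a : α) (t : List α), l.dropWhile p = a :: t → p a = false := by
  intro l
  induction l with
  | nil => intro a t h; simp at h
  | cons x xs ih =>
    intro a t h
    rw [List.dropWhile_cons] at h
    split at h
    · exact ih a t h
    · next hx => cases h; simpa using hx

theorem strip_space_cons (cs : List Char) :
    PySem.Chars.strip (' ' :: cs) = PySem.Chars.strip cs := by
  simp [PySem.Chars.strip, PySem.Chars.lstrip, PySem.Chars.isspace]

theorem main_eq (name : String) :
    from_first_von_last_py name = from_first_von_last_py_alt name := by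
  have htok := split₀_tokens name.toList
  unfold from_first_von_last_py from_first_von_last_py_alt
  set ts := PySem.Chars.split₀ name.toList with hts
  by_cases h0 : ts = []
  · simp [h0]
  · have hrne : ts.reverse ≠ [] := by simpa using h0
    obtain ⟨t, rest, hrev⟩ := List.exists_cons_of_ne_nil hrne
    have hlast : ts.getLast? = some t := by
      rw [← List.head?_reverse, hrev]; rfl
    rw [if_neg h0]
    simp only [hlast, fvlLoop_state0, List.nil_append]
    by_cases hl : pyStrIslower t
    · have hT : ts.reverse.takeWhile (fun x => !pyStrIslower x) = [] := by
        rw [hrev]; simp [hl]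
      rw [hT]
      simp [hl]
    · rw [if_neg hl]
      set L := ts.reverse.takeWhile (fun x => !pyStrIslower x) with hL
      set r' := ts.reverse.dropWhile (fun x => !pyStrIslower x) with hr'
      set V := r'.takeWhile pyStrIslower with hV
      set R := r'.dropWhile pyStrIslower with hR
      -- every token of ts is nonempty and whitespace-free
      have hmemL : ∀ u ∈ L, u ∈ ts := fun u hu =>
        List.mem_reverse.mp ((List.takeWhile_sublist _).subset hu)
      have hmemV : ∀ u ∈ V, u ∈ ts := fun u hu =>
        List.mem_reverse.mp ((List.dropWhile_sublist _).subset ((List.takeWhile_sublist _).subset hu))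
      have hmemR : ∀ u ∈ R, u ∈ ts := fun u hu =>
        List.mem_reverse.mp ((List.dropWhile_sublist _).subset ((List.dropWhile_sublist _).subset hu))
      have hLne : L ≠ [] := by
        rw [hL, hrev]; simp [hl]
      have hdecomp : ts = R.reverse ++ (V.reverse ++ L.reverse) := by
        have h1 : L ++ (V ++ R) = ts.reverse := by
          rw [hV, hR, List.takeWhile_append_dropWhile, hL, hr',
            List.takeWhile_append_dropWhile]
        have := congrArg List.reverse h1
        simpa using this.symm
      have hjoin_ne : ∀ (zs : List (List Char)), zs ≠ [] → (∀ u ∈ zs, u ∈ ts) →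
          PySem.Chars.join [' '] zs.reverse ≠ [] := by
        intro zs hzs hzmem
        obtain ⟨y, ys, hzr⟩ := List.exists_cons_of_ne_nil (by simpa using hzs : zs.reverse ≠ [])
        rw [hzr]
        exact join_ne_nil _ _ _ (htok y (hzmem y (by
          have : y ∈ zs.reverse := by rw [hzr]; simp
          simpa using this))).1
      have htokset : ∀ (zs : List (List Char)), (∀ u ∈ zs, u ∈ ts) →
          ∀ u ∈ zs, u ≠ [] ∧ ∀ c ∈ u, PySem.Chars.isspace c = false := by
        intro zs hzmem u hu; exact htok u (hzmem u hu)
      have htokrev : ∀ (zs : List (List Char)), (∀ u ∈ zs, u ∈ ts) →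
          ∀ u ∈ zs.reverse, u ≠ [] ∧ ∀ c ∈ u, PySem.Chars.isspace c = false :=
        fun zs h u hu => htok u (h u (List.mem_reverse.mp hu))
      have hls_ne : PySem.Chars.join [' '] L.reverse ≠ [] := hjoin_ne L hLne hmemL
      by_cases hVnil : V = []
      · -- no von part at all: R is empty too, A takes the second branch
        have hRnil : R = [] := by
          rcases hq : r' with _ | ⟨a, tl⟩
          · rw [hR, hq]; rfl
          · exfalso
            have ha := dropWhile_head_false (fun x => !pyStrIslower x) ts.reverse a tl
              (by rw [← hr', hq])
            rw [hV, hq] at hVnil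
            simp at ha
            simp [ha] at hVnil
        rw [hVnil, hRnil] at hdecomp ⊢
        simp only [List.reverse_nil, PySem.Chars.join_nil, List.nil_append]
        rw [if_neg (by simp), if_pos hls_ne, List.singleton_append, strip_space_cons,
          strip_join _ (by simpa using hLne) (htokrev _ hmemL), hdecomp]
        simp
      · have hvs_ne : PySem.Chars.join [' '] V.reverse ≠ [] := hjoin_ne V hVnil hmemV
        rw [if_pos ⟨hvs_ne, hls_ne⟩]
        have hVLr : V.reverse ++ L.reverse ≠ [] := by simp [hLne]
        have hjVL : PySem.Chars.join [' '] (V.reverse ++ L.reverse) =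
            PySem.Chars.join [' '] V.reverse ++ [' '] ++ PySem.Chars.join [' '] L.reverse :=
          join_append _ _ _ (by simpa using hVnil) (by simpa using hLne)
        by_cases hRnil : R = []
        · rw [hRnil] at hdecomp ⊢
          simp only [List.reverse_nil, PySem.Chars.join_nil]
          rw [show ([] : List Char) ++ [' '] ++ PySem.Chars.join [' '] V.reverse ++ [' '] ++
              PySem.Chars.join [' '] L.reverse =
              ' ' :: PySem.Chars.join [' '] (V.reverse ++ L.reverse) by rw [hjVL]; simp]
          rw [strip_space_cons,
            strip_join _ hVLr (htokset _ (by
              intro u hu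
              rcases List.mem_append.mp hu with h | h
              · exact hmemV u (List.mem_reverse.mp h)
              · exact hmemL u (List.mem_reverse.mp h))),
            hdecomp]
          simp
        · have hjAll : PySem.Chars.join [' '] (R.reverse ++ (V.reverse ++ L.reverse)) =
              PySem.Chars.join [' '] R.reverse ++ [' '] ++
                PySem.Chars.join [' '] V.reverse ++ [' '] ++
                PySem.Chars.join [' '] L.reverse := by
            rw [join_append _ _ _ (by simpa using hRnil) (by simp [hLne]), hjVL]
            simp
          rw [show PySem.Chars.join [' '] R.reverse ++ [' '] ++
              PySem.Chars.join [' '] V.reverse ++ [' '] ++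
              PySem.Chars.join [' '] L.reverse =
              PySem.Chars.join [' '] (R.reverse ++ (V.reverse ++ L.reverse)) from hjAll.symm]
          rw [strip_join _ (by simp [hLne]) (htokset _ (by
            intro u hu
            rcases List.mem_append.mp hu with h | h
            · exact hmemR u (List.mem_reverse.mp h)
            rcases List.mem_append.mp h with h | h
            · exact hmemV u (List.mem_reverse.mp h)
            · exact hmemL u (List.mem_reverse.mp h))), hdecomp]

-- ===== VERDICT (by name: the statement is the Claim_ definition above) =====
theorem from_first_von_last_py_spec : Claim_equal_from_first_von_last_py := by
  intro name _
  unfold Spec_from_first_von_last_py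
  exact main_eq name
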